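-- pv_equiv track=rewrite | github.com/spranavi-arch/document-generator | formatting/utils/formatter.py | _split_caption_body
-- ===== SOURCE A (Python) =====
-- BODY_START_PHRASES = (
--     "please take notice",
--     "take further notice",
--     "dated:",
--     "affirms the following",
--     "under the penalties of perjury",
--     "being duly sworn",
--     "duly sworn, says",
-- )
--
-- RIGHT_CAPTION_PHRASES = (
--     "index no",
--     "index number",
--     "notice of motion",
--     "to restore",
--     "affirmation in support",
--     "affidavit of service",
--     "memorandum of law",
-- )
--
-- def _split_caption_body(blocks: list) -> tuple[list, list, list]:
--     """Split blocks into caption_left, caption_right, body. Returns (caption_left, caption_right, body_blocks)."""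
--     if not blocks:
--         return [], [], []
--     body_start_idx = None
--     for i, (bt, text) in enumerate(blocks):
--         t = (text or "").strip().lower()
--         if not t:
--             continue
--         for phrase in BODY_START_PHRASES:
--             if phrase in t or t.startswith(phrase):
--                 body_start_idx = i
--                 break
--         if body_start_idx is not None:
--             break
--     if body_start_idx is None:
--         return [], [], blocks
--     caption_blocks = blocks[:body_start_idx]
--     body_blocks = blocks[body_start_idx:]
--     left, right = [], []
--     for b in caption_blocks:
--         bt, text = b
--         t = (text or "").strip().lower()
--         is_right = any(p in t for p in RIGHT_CAPTION_PHRASES) or (t == "to restore")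
--         if is_right:
--             right.append(b)
--         else:
--             left.append(b)
--     return left, right, body_blocks
-- ===== SOURCE B (Python) =====
-- BODY_START_PHRASES = (
--     "please take notice",
--     "take further notice",
--     "dated:",
--     "affirms the following",
--     "under the penalties of perjury",
--     "being duly sworn",
--     "duly sworn, says",
-- )
--
-- RIGHT_CAPTION_PHRASES = (
--     "index no",
--     "index number",
--     "notice of motion",
--     "to restore",
--     "affirmation in support",
--     "affidavit of service",
--     "memorandum of law",
-- )
--
--
-- def _split_caption_body(blocks: list) -> tuple[list, list, list]:
--     """Single fused pass: classify caption blocks left/right while scanning for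
--     the body start; on finding it, return the accumulators and the remaining
--     suffix; if none is found, the whole input is the body."""
--     left, right = [], []
--     suffix = blocks
--     while suffix:
--         bt, text = suffix[0]
--         t = (text or "").strip().lower()
--         if t and any(p in t for p in BODY_START_PHRASES):
--             return left, right, suffix
--         if any(p in t for p in RIGHT_CAPTION_PHRASES):
--             right.append((bt, text))
--         else:
--             left.append((bt, text))
--         suffix = suffix[1:]
--     return [], [], blocks
-- ===== Notes on version B (the rewrite author's own statement) =====
-- stated objective: alternative
-- what changed: Replaced A's two passes (first find the body-start index by scanning with enumerate, then a second classification loop over the caption slice) by a single fused pass that classifies each block into left/right while scanning, returning the accumulators and the current suffix as soon as a body start is found.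
import Mathlib
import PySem

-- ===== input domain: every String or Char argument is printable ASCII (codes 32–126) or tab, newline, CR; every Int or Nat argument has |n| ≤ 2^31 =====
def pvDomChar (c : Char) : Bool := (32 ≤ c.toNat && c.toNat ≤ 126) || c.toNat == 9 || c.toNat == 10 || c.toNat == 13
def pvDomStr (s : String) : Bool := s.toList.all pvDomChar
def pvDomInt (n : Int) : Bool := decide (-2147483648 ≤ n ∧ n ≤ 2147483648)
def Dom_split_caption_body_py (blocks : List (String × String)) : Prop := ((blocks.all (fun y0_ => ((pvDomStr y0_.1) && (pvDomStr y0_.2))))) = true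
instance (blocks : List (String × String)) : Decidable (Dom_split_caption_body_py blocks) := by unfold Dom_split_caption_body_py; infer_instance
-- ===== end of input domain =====

-- B fuses A's two passes (find body-start index, then classify the caption slice)
-- into one accumulator loop over the block list; same return value, alternative decomposition.


-- shared module constants
def pvBodyPhrases : List String :=
  ["please take notice", "take further notice", "dated:", "affirms the following",
   "under the penalties of perjury", "being duly sworn", "duly sworn, says"]

def pvRightPhrases : List String :=
  ["index no", "index number", "notice of motion", "to restore",
   "affirmation in support", "affidavit of service", "memorandum of law"]

-- t = (text or "").strip().lower()  ('text or ""' is the identity on strings: '"" or ""' is "")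
def pvT (text : String) : String := PySem.Str.lower (PySem.Str.strip text)

-- ===== PORT A =====
-- A's first loop: 'for i, (bt, text) in enumerate(blocks): … continue on empty t …
-- for phrase in BODY_START_PHRASES: if phrase in t or t.startswith(phrase): body_start_idx = i; break'
def findStartA : List (String × String) → Nat → Option Nat
  | [], _ => none
  | b :: rest, i =>
      let t := pvT b.2
      if t = "" then findStartA rest (i + 1)
      else if pvBodyPhrases.any (fun p => PySem.Str.isIn p t || PySem.Str.startswith t p)
      then some i
      else findStartA rest (i + 1)

-- A's second loop over caption_blocks, state (left, right)
def classStepA (lr : List (String × String) × List (String × String)) (b : String × String) :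
    List (String × String) × List (String × String) :=
  let t := pvT b.2
  let is_right := pvRightPhrases.any (fun p => PySem.Str.isIn p t) || (t == "to restore")
  if is_right then (lr.1, lr.2 ++ [b]) else (lr.1 ++ [b], lr.2)

def split_caption_body_py (blocks : List (String × String)) : (List (String × String)) × (List (String × String)) × (List (String × String)) :=
  if blocks = [] then ([], [], [])
  else
    match findStartA blocks 0 with
    | none => ([], [], blocks)
    | some i =>
        -- blocks[:i] / blocks[i:] with 0 ≤ i < len blocks: take/drop are exact here
        let caption_blocks := blocks.take i
        let body_blocks := blocks.drop i
        let lr := caption_blocks.foldl classStepA ([], [])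
        (lr.1, lr.2, body_blocks)

-- ===== PORT B =====
def isBodyStartB (t : String) : Bool := pvBodyPhrases.any (fun p => PySem.Str.isIn p t)
def isRightB (t : String) : Bool := pvRightPhrases.any (fun p => PySem.Str.isIn p t)

-- B's single while-loop over the remaining suffix, accumulating left/right
def goB (blocks : List (String × String)) :
    List (String × String) → List (String × String) → List (String × String) →
    (List (String × String)) × (List (String × String)) × (List (String × String))
  | [], _, _ => ([], [], blocks)
  | b :: rest, left, right =>
      let t := pvT b.2
      if t ≠ "" && isBodyStartB t then (left, right, b :: rest)
      else if isRightB t then goB blocks rest left (right ++ [b])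
      else goB blocks rest (left ++ [b]) right

def split_caption_body_py_alt (blocks : List (String × String)) : (List (String × String)) × (List (String × String)) × (List (String × String)) :=
  goB blocks blocks [] []

-- ===== PRECONDITION & SPEC =====
def Spec_split_caption_body_py (blocks : List (String × String)) (out : (List (String × String)) × (List (String × String)) × (List (String × String))) : Prop := out = split_caption_body_py_alt blocks
instance (blocks : List (String × String)) (out : (List (String × String)) × (List (String × String)) × (List (String × String))) : Decidable (Spec_split_caption_body_py blocks out) := by unfold Spec_split_caption_body_py; infer_instance

-- ===== CLAIM (what is proved, stated in full; the proofs are below) =====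
def Claim_equal_split_caption_body_py : Prop := ∀ (blocks : List (String × String)), Dom_split_caption_body_py blocks → Spec_split_caption_body_py blocks (split_caption_body_py blocks)

-- ===== LEMMAS AND PROOFS =====

-- 'phrase in t or t.startswith(phrase)' collapses to 'phrase in t'
theorem or_startswith (p t : String) :
    (PySem.Str.isIn p t || PySem.Str.startswith t p) = PySem.Str.isIn p t := by
  cases hI : PySem.Str.isIn p t with
  | true => simp
  | false =>
    cases hS : PySem.Str.startswith t p with
    | false => simp
    | true =>
      exfalso
      have hpre : p.toList <+: t.toList := (PySem.Chars.startswith_iff _ _).mp (by simpa using hS)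
      have hni : ¬ p.toList <:+: t.toList := (PySem.Chars.isIn_eq_false_iff _ _).mp (by simpa using hI)
      exact hni hpre.isInfix

theorem bodyA_eq (t : String) :
    pvBodyPhrases.any (fun p => PySem.Str.isIn p t || PySem.Str.startswith t p) = isBodyStartB t := by
  simp only [isBodyStartB, or_startswith]

-- '… or t == "to restore"' collapses since "to restore" is among the right phrases
theorem isRight_eq (t : String) :
    (pvRightPhrases.any (fun p => PySem.Str.isIn p t) || (t == "to restore")) = isRightB t := by
  by_cases h : t = "to restore"
  · subst h; decide
  · simp [isRightB, h]

theorem findStartA_succ (l : List (String × String)) :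
    ∀ i, findStartA l (i + 1) = Option.map Nat.succ (findStartA l i) := by
  induction l with
  | nil => intro i; rfl
  | cons b rest ih =>
    intro i
    simp only [findStartA]
    split_ifs with h1 h2
    · exact ih (i + 1)
    · rfl
    · exact ih (i + 1)

theorem goB_eq (blocks : List (String × String)) :
    ∀ (l left right : List (String × String)),
      goB blocks l left right =
        match findStartA l 0 with
        | none => ([], [], blocks)
        | some i =>
            let lr := (l.take i).foldl classStepA (left, right)
            (lr.1, lr.2, l.drop i) := by
  intro l
  induction l with
  | nil => intro left right; rfl
  | cons b rest ih =>
    intro left right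
    by_cases hcond : (decide (pvT b.2 ≠ "") && isBodyStartB (pvT b.2)) = true
    · obtain ⟨ht', hb⟩ := Bool.and_eq_true_iff.mp hcond
      have ht : ¬ pvT b.2 = "" := of_decide_eq_true ht'
      have hA : findStartA (b :: rest) 0 = some 0 := by
        simp only [findStartA]
        rw [if_neg ht, if_pos (by rw [bodyA_eq]; exact hb)]
      simp only [goB]
      rw [if_pos hcond, hA]
      simp
    · have hrec : goB blocks (b :: rest) left right
          = goB blocks rest (classStepA (left, right) b).1 (classStepA (left, right) b).2 := by
        simp only [goB]
        rw [if_neg hcond]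
        simp only [classStepA, isRight_eq]
        by_cases hr : isRightB (pvT b.2) = true
        · simp [hr]
        · simp [hr]
      have hfs : findStartA (b :: rest) 0 = Option.map Nat.succ (findStartA rest 0) := by
        simp only [findStartA]
        by_cases ht : pvT b.2 = ""
        · rw [if_pos ht]; exact findStartA_succ rest 0
        · rw [if_neg ht, if_neg ?hside]
          · exact findStartA_succ rest 0
          case hside =>
            rw [bodyA_eq]
            intro hb
            exact hcond (by simp [ht, hb])  -- ht : t ≠ "" so decide true
      rw [hrec, ih, hfs]
      cases hfo : findStartA rest 0 with
      | none => simp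
      | some i => simp

-- ===== VERDICT (by name: the statement is the Claim_ definition above) =====
theorem split_caption_body_py_spec : Claim_equal_split_caption_body_py := by
  intro blocks _
  unfold Spec_split_caption_body_py split_caption_body_py split_caption_body_py_alt
  rw [goB_eq]
  by_cases hb : blocks = []
  · subst hb; rfl
  · rw [if_neg hb]
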